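/- GENERATED by farm/mkstatement.py from design/units.tsv (unit `vorbis_finish_frame.1`) and the assertions of Vorbis/Spec/FinishFrame.lean — do not edit.
   THE STATEMENT of the proof unit `vorbis_finish_frame.1`: segment 1 of `vorbis_finish_frame` (43 instructions; entries 0x107060;
   exits 0x107184,0x1071ae,ret; ranges 0x107060-0x1070ba + 0x107194-0x1071ac + 0x10729c-0x1072a4 + 0x107289-0x10729b)
   takes each of its entry assertions to one of its exit assertions (`Vorbis.Spec.vorbis_finish_frame.Seg1`), given the contracts of its callees.
   What the names mean: Vorbis/Spec/Basic.lean (the shared hypotheses), Vorbis/Spec/FinishFrame.lean (the assertions). The theorem to prove: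
   `theorem vorbis_finish_frame_1_ok : Vorbis.Spec.vorbis_finish_frame_1.Statement`. -/
import Vorbis.Spec.FinishFrame
import Vorbis.Spec.Mdct
namespace Vorbis.Spec.vorbis_finish_frame_1
open X86 X86.User Asan

/-- The statement of unit `vorbis_finish_frame.1`. -/
def Statement : Prop :=
  ∀ (Lay : Layout) (_hLay : Lay.hi = 0x1000000) (μ : Microarch) (_hμ : UserX.MicroOK μ) (u₀ : State)
    (_hcode : HasCodeNat Lay u₀ Vorbis.L.vorbis_finish_frame.entry Vorbis.Code.code_vorbis_finish_frame.nat Vorbis.L.vorbis_finish_frame.size)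
    (_h_asan_load4_noabort : Asan.SmallCheck Lay μ Vorbis.WayInv (Vorbis.CodeOK u₀) [.rax, .rcx, .rdx] 4 Vorbis.L.__asan_load4_noabort.entry)
    (_h_get_window : ∀ (others : List Obj) (frames : List (Nat × FrameLayout)), Calls Lay μ Vorbis.WayInv (Vorbis.conv u₀) Vorbis.L.get_window.entry (Vorbis.Spec.get_window.spec others frames)),
    Vorbis.Spec.vorbis_finish_frame.Seg1 Lay μ u₀

end Vorbis.Spec.vorbis_finish_frame_1
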